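-- pv_equiv track=rewrite | github.com/Gajjar21/Scanatom | Scripts/awb_hotfolder.py | pick_unique_close_match
-- ===== SOURCE A (Python) =====
-- def hamming(a, b):
--     return sum(1 for x, y in zip(a, b) if x != y)
--
-- def pick_unique_close_match(candidate, awb_set, by_prefix, by_suffix, max_distance=2):
--     pool = set()
--     pool.update(by_prefix.get(candidate[:4], []))
--     pool.update(by_suffix.get(candidate[-4:], []))
--     if not pool:
--         pool = awb_set
--     scored = [(a, hamming(candidate, a)) for a in pool if hamming(candidate, a) <= max_distance]
--     if not scored:
--         return None
--     scored.sort(key=lambda x: x[1])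
--     best_awb, best_d = scored[0]
--     if len([a for a, d in scored if d == best_d]) != 1:
--         return None
--     return best_awb
-- ===== SOURCE B (Python) =====
-- def hamming(a, b):
--     return sum(1 for x, y in zip(a, b) if x != y)
--
-- def pick_unique_close_match(candidate, awb_set, by_prefix, by_suffix, max_distance=2):
--     pool = set()
--     pool.update(by_prefix.get(candidate[:4], []))
--     pool.update(by_suffix.get(candidate[-4:], []))
--     if not pool:
--         pool = awb_set
--     best_awb = None
--     best_d = None
--     count = 0
--     for a in pool:
--         d = hamming(candidate, a)
--         if d > max_distance:
--             continue
--         if best_d is None or d < best_d: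
--             best_awb, best_d, count = a, d, 1
--         elif d == best_d:
--             count += 1
--     if best_d is None or count != 1:
--         return None
--     return best_awb
-- ===== Notes on version B (the rewrite author's own statement) =====
-- stated objective: simpler
-- what changed: Replaces the build-scored-list / sort / re-filter-and-count logic with a single pass over the pool that keeps the running best distance, its first achiever and a tie count, computing each hamming distance once instead of twice and never materialising or sorting a scored list.
import Mathlib
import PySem

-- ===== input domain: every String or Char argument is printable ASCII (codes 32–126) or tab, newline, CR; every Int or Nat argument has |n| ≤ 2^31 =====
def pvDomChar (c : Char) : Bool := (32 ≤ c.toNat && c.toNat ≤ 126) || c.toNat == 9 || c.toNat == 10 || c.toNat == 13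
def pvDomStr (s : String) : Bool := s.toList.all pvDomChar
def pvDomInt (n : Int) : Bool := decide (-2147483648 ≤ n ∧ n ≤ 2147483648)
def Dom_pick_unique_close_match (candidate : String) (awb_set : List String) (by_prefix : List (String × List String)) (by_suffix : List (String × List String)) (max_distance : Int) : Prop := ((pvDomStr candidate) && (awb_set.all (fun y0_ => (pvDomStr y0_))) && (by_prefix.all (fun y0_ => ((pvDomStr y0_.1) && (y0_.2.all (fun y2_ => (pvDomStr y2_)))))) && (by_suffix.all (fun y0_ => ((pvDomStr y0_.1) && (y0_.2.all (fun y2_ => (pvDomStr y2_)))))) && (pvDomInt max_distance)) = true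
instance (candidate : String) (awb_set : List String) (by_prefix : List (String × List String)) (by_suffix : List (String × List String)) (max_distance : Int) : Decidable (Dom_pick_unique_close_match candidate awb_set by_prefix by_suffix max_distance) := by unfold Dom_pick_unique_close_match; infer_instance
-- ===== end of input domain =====

-- B replaces A's build-scored-list / sort / re-count logic by a single best/count pass over the pool (simpler; same pool-building block).


-- shared module helper: hamming(a, b) = sum(1 for x, y in zip(a, b) if x != y)
def hamming (a b : String) : Int :=
  (a.toList.zip b.toList).foldl (fun s p => if p.1 ≠ p.2 then s + 1 else s) 0

-- shared pool-building block (identical in A and B):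
-- pool = set(); pool.update(by_prefix.get(candidate[:4], [])); pool.update(by_suffix.get(candidate[-4:], [])); if not pool: pool = awb_set
def buildPool (candidate : String) (awb_set : List String) (by_prefix : List (String × List String)) (by_suffix : List (String × List String)) : List String :=
  let pool : PySem.Set String := PySem.Set.empty
  let pool := PySem.Set.update pool ((PySem.Dict.mk by_prefix).getD (PySem.Str.slice candidate none (some 4)) [])
  let pool := PySem.Set.update pool ((PySem.Dict.mk by_suffix).getD (PySem.Str.slice candidate (some (-4)) none) [])
  if pool = [] then awb_set else pool

-- ===== PORT A =====
def pick_unique_close_match (candidate : String) (awb_set : List String) (by_prefix : List (String × List String)) (by_suffix : List (String × List String)) (max_distance : Int) : Option String :=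
  let pool := buildPool candidate awb_set by_prefix by_suffix
  let scored := pool.filterMap (fun a => if hamming candidate a ≤ max_distance then some (a, hamming candidate a) else none)
  if scored.isEmpty then none
  else
    let scoredSorted := PySem.List.sorted scored (fun x => x.2) false
    match scoredSorted with
    | [] => none   -- unreachable: sorted of a non-empty list is non-empty
    | (best_awb, best_d) :: _ =>
      if (scoredSorted.filter (fun p => p.2 == best_d)).length ≠ 1 then none
      else some best_awb

-- ===== PORT B =====
def bStep (candidate : String) (max_distance : Int) (st : Option (String × Int) × Nat) (a : String) : Option (String × Int) × Nat :=
  let d := hamming candidate a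
  if d > max_distance then st
  else
    match st.1 with
    | none => (some (a, d), 1)
    | some (_, best_d) =>
      if d < best_d then (some (a, d), 1)
      else if d = best_d then (st.1, st.2 + 1)
      else st

def pick_unique_close_match_alt (candidate : String) (awb_set : List String) (by_prefix : List (String × List String)) (by_suffix : List (String × List String)) (max_distance : Int) : Option String :=
  let pool := buildPool candidate awb_set by_prefix by_suffix
  let st := pool.foldl (bStep candidate max_distance) (none, 0)
  match st with
  | (some (best_awb, _), 1) => some best_awb
  | _ => none

-- ===== PRECONDITION & SPEC =====
def Spec_pick_unique_close_match (candidate : String) (awb_set : List String) (by_prefix : List (String × List String)) (by_suffix : List (String × List String)) (max_distance : Int) (out : Option String) : Prop := out = pick_unique_close_match_alt candidate awb_set by_prefix by_suffix max_distance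
instance (candidate : String) (awb_set : List String) (by_prefix : List (String × List String)) (by_suffix : List (String × List String)) (max_distance : Int) (out : Option String) : Decidable (Spec_pick_unique_close_match candidate awb_set by_prefix by_suffix max_distance out) := by unfold Spec_pick_unique_close_match; infer_instance

-- ===== CLAIM (what is proved, stated in full; the proofs are below) =====
def Claim_equal_pick_unique_close_match : Prop := ∀ (candidate : String) (awb_set : List String) (by_prefix : List (String × List String)) (by_suffix : List (String × List String)) (max_distance : Int), Dom_pick_unique_close_match candidate awb_set by_prefix by_suffix max_distance → Spec_pick_unique_close_match candidate awb_set by_prefix by_suffix max_distance (pick_unique_close_match candidate awb_set by_prefix by_suffix max_distance)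

-- ===== LEMMAS AND PROOFS =====

-- the step of B's loop on an already-qualified scored pair
def pvStep (st : Option (String × Int) × Nat) (p : String × Int) : Option (String × Int) × Nat :=
  match st.1 with
  | none => (some p, 1)
  | some (b, best_d) =>
    if p.2 < best_d then (some p, 1)
    else if p.2 = best_d then (some (b, best_d), st.2 + 1)
    else st

lemma pvStep_some (b : String) (bd : Int) (n : Nat) (p : String × Int) :
    pvStep (some (b, bd), n) p
      = if p.2 < bd then (some p, 1) else if p.2 = bd then (some (b, bd), n + 1) else (some (b, bd), n) := rfl

lemma bStep_eq_pvStep (c : String) (m : Int) (st : Option (String × Int) × Nat) (a : String)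
    (h : hamming c a ≤ m) : bStep c m st a = pvStep st (a, hamming c a) := by
  rcases st with ⟨b?, n⟩
  simp only [bStep, pvStep]
  rw [if_neg (by omega)]
  rcases b? with _ | ⟨b, bd⟩ <;> simp

lemma foldl_bStep_eq (c : String) (m : Int) (pool : List String) :
    ∀ st, pool.foldl (bStep c m) st
      = (pool.filterMap (fun a => if hamming c a ≤ m then some (a, hamming c a) else none)).foldl pvStep st := by
  induction pool with
  | nil => intro st; rfl
  | cons a t ih =>
    intro st
    by_cases h : hamming c a ≤ m
    · simp only [List.foldl_cons, List.filterMap_cons, if_pos h, List.foldl_cons,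
        bStep_eq_pvStep c m st a h, ih]
    · simp only [List.foldl_cons, List.filterMap_cons, if_neg h]
      rw [show bStep c m st a = st by simp only [bStep]; rw [if_pos (by omega)], ih]

-- characterization of B's loop state on a non-empty qualified list
lemma foldl_pvStep_char (q : List (String × Int)) (hq : q ≠ []) :
    ∃ b d, q.foldl pvStep (none, 0) = (some (b, d), (q.filter (fun p => p.2 == d)).length)
      ∧ (b, d) ∈ q ∧ ∀ p ∈ q, d ≤ p.2 := by
  induction q using List.reverseRecOn with
  | nil => exact absurd rfl hq
  | append_singleton l p ih =>
    rcases p with ⟨a, d⟩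
    rcases eq_or_ne l [] with rfl | hl
    · exact ⟨a, d, by simp [pvStep], by simp, by simp⟩
    · obtain ⟨b, bd, hfold, hmem, hmin⟩ := ih hl
      rw [List.foldl_append, hfold, List.foldl_cons, List.foldl_nil, pvStep_some]
      rcases lt_trichotomy d bd with hlt | rfl | hgt
      · rw [if_pos hlt]
        refine ⟨a, d, ?_, by simp, ?_⟩
        · have hfe : l.filter (fun p => p.2 == d) = [] :=
            List.filter_eq_nil_iff.2 (fun p hp => by
              have := hmin p hp; simp only [beq_iff_eq]; omega)
          rw [List.filter_append, hfe, List.nil_append, List.filter_singleton]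
          simp
        · intro p hp
          rcases List.mem_append.1 hp with h1 | h1
          · have := hmin p h1; omega
          · rw [List.mem_singleton] at h1; rw [h1]
      · rw [if_neg (lt_irrefl d), if_pos rfl]
        refine ⟨b, d, ?_, List.mem_append_left _ hmem, ?_⟩
        · rw [List.filter_append, List.filter_singleton]
          simp
        · intro p hp
          rcases List.mem_append.1 hp with h1 | h1
          · exact hmin p h1
          · rw [List.mem_singleton] at h1; rw [h1]
      · rw [if_neg (by omega), if_neg (by omega)]
        refine ⟨b, bd, ?_, List.mem_append_left _ hmem, ?_⟩
        · rw [List.filter_append, List.filter_singleton]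
          have hf : (((a, d) : String × Int).2 == bd) = false := by
            simp only [beq_eq_false_iff_ne, ne_eq]; omega
          rw [hf]
          simp
        · intro p hp
          rcases List.mem_append.1 hp with h1 | h1
          · exact hmin p h1
          · rw [List.mem_singleton] at h1; rw [h1]; exact le_of_lt hgt

-- the two bodies agree once the pool is fixed
lemma core (c : String) (m : Int) (pool : List String) :
    (let scored := pool.filterMap (fun a => if hamming c a ≤ m then some (a, hamming c a) else none)
     if scored.isEmpty then none
     else
       match PySem.List.sorted scored (fun x => x.2) false with
       | [] => none
       | (best_awb, best_d) :: _ =>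
         if ((PySem.List.sorted scored (fun x => x.2) false).filter (fun p => p.2 == best_d)).length ≠ 1 then none
         else some best_awb)
    = (match pool.foldl (bStep c m) (none, 0) with
       | (some (best_awb, _), 1) => some best_awb
       | _ => none) := by
  rw [foldl_bStep_eq c m pool]
  set scored := pool.filterMap (fun a => if hamming c a ≤ m then some (a, hamming c a) else none) with hscored
  rcases eq_or_ne scored [] with hnil | hne
  · simp [hnil]
  · obtain ⟨b, d, hfold, hmem, hmin⟩ := foldl_pvStep_char scored hne
    rw [hfold]
    have hperm : (PySem.List.sorted scored (fun x => x.2) false).Perm scored :=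
      PySem.List.sorted_perm scored (fun x => x.2) false
    have hsne : PySem.List.sorted scored (fun x => x.2) false ≠ [] := by
      intro h; exact hne (List.Perm.nil_eq (h ▸ hperm)).symm
    rcases hhead : PySem.List.sorted scored (fun x => x.2) false with _ | ⟨⟨bA, dA⟩, tail⟩
    · exact absurd hhead hsne
    · have hdAmin : ∀ y ∈ scored, dA ≤ y.2 := by
        intro y hy
        exact PySem.List.key_head_sorted_le scored (fun x => x.2) hhead y hy
      have hAmem : (bA, dA) ∈ scored := hperm.subset (hhead ▸ List.mem_cons_self ..)
      have hdd : dA = d := le_antisymm (hdAmin _ hmem) (hmin _ hAmem)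
      subst hdd
      have hcnt : ((PySem.List.sorted scored (fun x => x.2) false).filter (fun p => p.2 == dA)).length
          = (scored.filter (fun p => p.2 == dA)).length :=
        (hperm.filter _).length_eq
      rw [if_neg (by simp [hne]), hhead]
      have hcnt2 : (((bA, dA) :: tail).filter (fun p => p.2 == dA)).length
          = (scored.filter (fun p => p.2 == dA)).length := by rw [← hhead]; exact hcnt
      rcases hc : (scored.filter (fun p => p.2 == dA)).length with _ | n
      · -- impossible: the head of the sorted list is in the filter
        exfalso
        have hmemf : (bA, dA) ∈ scored.filter (fun p => p.2 == dA) := by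
          simp [List.mem_filter, hAmem]
        rw [List.length_eq_zero_iff] at hc
        rw [hc] at hmemf
        simp at hmemf
      · rcases n with _ | n
        · -- unique minimizer: the two heads coincide
          obtain ⟨p, hp⟩ := List.length_eq_one_iff.1 hc
          have hbA : (bA, dA) = p := by
            have : (bA, dA) ∈ scored.filter (fun p => p.2 == dA) := by
              simp [List.mem_filter, hAmem]
            rw [hp] at this; simpa using this
          have hb : (b, dA) = p := by
            have : (b, dA) ∈ scored.filter (fun p => p.2 == dA) := by
              simp [List.mem_filter, hmem]
            rw [hp] at this; simpa using this
          have hbb : bA = b := by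
            have h2 := hbA.trans hb.symm
            exact (Prod.mk.injEq .. ▸ h2).1
          have h1 : (((bA, dA) :: tail).filter (fun p => p.2 == dA)).length = 1 := by
            rw [hcnt2, hc]
          have hft : tail.filter (fun p => p.2 == dA) = [] := by
            rw [List.filter_cons_of_pos (by simp), List.length_cons] at h1
            exact List.length_eq_zero_iff.1 (by omega)
          simp [hc, hbb]
          intro x hx
          have hxm : (x, dA) ∈ tail.filter (fun p => p.2 == dA) :=
            List.mem_filter.2 ⟨hx, by simp⟩
          rw [hft] at hxm
          simp at hxm
        · -- a tie: both sides return none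
          have h2 : (((bA, dA) :: tail).filter (fun p => p.2 == dA)).length = n + 1 + 1 := by
            rw [hcnt2, hc]
          rw [List.filter_cons_of_pos (by simp), List.length_cons] at h2
          have hpos : 0 < (tail.filter (fun p => p.2 == dA)).length := by omega
          obtain ⟨p, hp⟩ := List.exists_mem_of_length_pos hpos
          simp [hc]
          refine ⟨p.1, ?_⟩
          have hpt := (List.mem_filter.1 hp).1
          have hpd : p.2 = dA := by simpa using (List.mem_filter.1 hp).2
          have hpp : p = (p.1, dA) := by cases p; simp_all
          rwa [← hpp]

-- ===== VERDICT (by name: the statement is the Claim_ definition above) =====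
theorem pick_unique_close_match_spec : Claim_equal_pick_unique_close_match := by
  intro candidate awb_set by_prefix by_suffix max_distance _
  exact core candidate max_distance (buildPool candidate awb_set by_prefix by_suffix)
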